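-- pv_equiv track=rewrite | github.com/pypi-data/pypi-mirror-317 | packages/github-repo-analyzer/github_repo_analyzer-0.1.0-py3-none-any.whl/github_repo_analyzer/analyzer.py | parse_github_url
-- ===== SOURCE A (Python) =====
-- def parse_github_url(github_url: str) -> tuple:
--     """Parse GitHub URL to extract repository URL and subdirectory path."""
--     url_parts = github_url.replace('/tree/', '/').replace('/blob/', '/').split('/')
--     repo_parts = []
--     branch_found = False
--     subdirectory_parts = []
--
--     for i, part in enumerate(url_parts):
--         if i < 5:  # Always include the first 5 parts (https://github.com/user/repo)
--             repo_parts.append(part)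
--         elif not branch_found and '.' not in part and part not in ['main', 'master']:
--             repo_parts.append(part)
--         else:
--             branch_found = True
--             if i < len(url_parts) - 1:
--                 subdirectory_parts.append(part)
--
--     repo_url = '/'.join(repo_parts)
--     subdirectory = '/'.join(subdirectory_parts[1:] if subdirectory_parts else [])
--     return repo_url, subdirectory
-- ===== SOURCE B (Python) =====
-- def parse_github_url(github_url: str) -> tuple:
--     """Parse GitHub URL to extract repository URL and subdirectory path."""
--     parts = github_url.replace('/tree/', '/').replace('/blob/', '/').split('/')
--     n = len(parts)
--     # Right-to-left pass with last-writer-wins: a branch marker resets the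
--     # repo accumulator and records its index; the leftmost marker is seen last,
--     # so it wins.  Kept parts are appended in reverse order and flipped once.
--     repo_rev = []
--     cut = None
--     for i in range(n - 1, -1, -1):
--         p = parts[i]
--         if i < 5 or ('.' not in p and p not in ('main', 'master')):
--             repo_rev.append(p)
--         else:
--             repo_rev, cut = [], i
--     repo_rev.reverse()
--     sub = [] if cut is None else parts[cut + 1:n - 1]
--     return '/'.join(repo_rev), '/'.join(sub)
-- ===== Notes on version B (the rewrite author's own statement) =====
-- stated objective: alternative
-- what changed: Replaces A's forward accumulate-with-flag loop (three pieces of state, subdirectory collected element by element and fixed up with [1:]) by a right-to-left pass with last-writer-wins: each branch marker resets the repo accumulator and records its index, the leftmost marker wins because it is seen last, the repo list is built in reverse and flipped once, and the subdirectory is one slice taken at the end.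
import Mathlib
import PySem

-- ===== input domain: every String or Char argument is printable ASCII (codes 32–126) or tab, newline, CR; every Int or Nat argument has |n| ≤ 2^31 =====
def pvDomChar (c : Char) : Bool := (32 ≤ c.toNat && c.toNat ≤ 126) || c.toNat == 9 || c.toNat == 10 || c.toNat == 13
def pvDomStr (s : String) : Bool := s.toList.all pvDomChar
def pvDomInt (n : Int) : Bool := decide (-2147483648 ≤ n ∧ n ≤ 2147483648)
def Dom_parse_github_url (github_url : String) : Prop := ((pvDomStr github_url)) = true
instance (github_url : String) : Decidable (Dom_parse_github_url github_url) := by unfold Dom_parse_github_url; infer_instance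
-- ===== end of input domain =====

-- B replaces A's forward accumulate-with-flag loop by a right-to-left pass with
-- last-writer-wins resets (the leftmost branch marker is seen last, so it wins),
-- building the repo list in reverse and taking the subdirectory as one slice at
-- the end (objective: alternative).

-- ===== PORT A =====
-- A's loop body: state = (repo_parts, branch_found, subdirectory_parts), ip = (i, part); n = len(url_parts)
def pvStepA (n : Nat) (st : List String × Bool × List String) (ip : Int × String) :
    List String × Bool × List String :=
  if ip.1 < 5 then (st.1 ++ [ip.2], st.2.1, st.2.2)
  else if !st.2.1 && !(PySem.Str.isIn "." ip.2) && !(ip.2 == "main" || ip.2 == "master") then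
    (st.1 ++ [ip.2], st.2.1, st.2.2)
  else
    (st.1, true, if ip.1 < (n : Int) - 1 then st.2.2 ++ [ip.2] else st.2.2)

def parse_github_url (github_url : String) : String × String :=
  let url_parts :=
    (PySem.Str.split? (PySem.Str.replace (PySem.Str.replace github_url "/tree/" "/") "/blob/" "/") "/").getD []
  let res := (PySem.List.enumerate url_parts 0).foldl (pvStepA url_parts.length) ([], false, [])
  let repo_url := PySem.Str.join "/" res.1
  let subdirectory :=
    PySem.Str.join "/" (if res.2.2 ≠ [] then PySem.List.slice res.2.2 (some 1) none else [])
  (repo_url, subdirectory)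

-- ===== PORT B =====
-- B's loop body over i = n-1, …, 0: state = (repo_rev, cut); p = parts[i] (always in range here)
def pvStepB (parts : List String) (st : List String × Option Int) (i : Int) :
    List String × Option Int :=
  let p := PySem.List.pyGetD parts i ""
  if i < 5 || (!(PySem.Str.isIn "." p) && !(p == "main" || p == "master")) then
    (st.1 ++ [p], st.2)
  else
    ([], some i)

def parse_github_url_alt (github_url : String) : String × String :=
  let parts :=
    (PySem.Str.split? (PySem.Str.replace (PySem.Str.replace github_url "/tree/" "/") "/blob/" "/") "/").getD []
  let n := parts.length
  let res := (PySem.List.pyRange ((n : Int) - 1) (-1) (-1)).foldl (pvStepB parts) ([], none)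
  let sub : List String :=
    match res.2 with
    | none => []
    | some c => PySem.List.slice parts (some (c + 1)) (some ((n : Int) - 1))
  (PySem.Str.join "/" res.1.reverse, PySem.Str.join "/" sub)

-- ===== PRECONDITION & SPEC =====
def Spec_parse_github_url (github_url : String) (out : String × String) : Prop := out = parse_github_url_alt github_url
instance (github_url : String) (out : String × String) : Decidable (Spec_parse_github_url github_url out) := by unfold Spec_parse_github_url; infer_instance

-- ===== CLAIM (what is proved, stated in full; the proofs are below) =====
def Claim_equal_parse_github_url : Prop := ∀ (github_url : String), Dom_parse_github_url github_url → Spec_parse_github_url github_url (parse_github_url github_url)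

-- ===== LEMMAS AND PROOFS =====

-- proof-side: index of the first branch marker at position ≥ 5 (or the length if none)
def pvFindBranch (k : Nat) : List String → Nat
  | [] => k
  | p :: rest =>
      if PySem.Str.isIn "." p || p == "main" || p == "master" then k
      else pvFindBranch (k + 1) rest

lemma pvFindBranch_ge (l : List String) : ∀ k, k ≤ pvFindBranch k l := by
  induction l with
  | nil => intro k; simp [pvFindBranch]
  | cons p t ih =>
      intro k
      simp only [pvFindBranch]
      split
      · exact le_refl k
      · exact le_trans (Nat.le_succ k) (ih (k + 1))

lemma pvFindBranch_le (l : List String) : ∀ k, pvFindBranch k l ≤ k + l.length := by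
  induction l with
  | nil => intro k; simp [pvFindBranch]
  | cons p t ih =>
      intro k
      simp only [pvFindBranch]
      split
      · omega
      · have := ih (k + 1); simp only [List.length_cons]; omega

-- ---- A side: characterize A's foldl as take/drop slices at the branch index ----

-- the elements collected into subdirectory_parts after the branch was found
def pvSeg (n : Nat) (l : List (Int × String)) : List String :=
  l.filterMap (fun ip => if ip.1 < (n : Int) - 1 then some ip.2 else none)

lemma pvCondB_eq (p : String) :
    (!(PySem.Str.isIn "." p) && !(p == "main" || p == "master")) =
      !(PySem.Str.isIn "." p || p == "main" || p == "master") := by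
  cases PySem.Str.isIn "." p <;> cases p == "main" <;> cases p == "master" <;> rfl

lemma pvCond_eq (p : String) :
    (!(false : Bool) && !(PySem.Str.isIn "." p) && !(p == "main" || p == "master")) =
      !(PySem.Str.isIn "." p || p == "main" || p == "master") := by
  cases PySem.Str.isIn "." p <;> cases p == "main" <;> cases p == "master" <;> rfl

lemma foldl_post (n : Nat) (l : List String) : ∀ (s : Int), 5 ≤ s → ∀ repo sub,
    (PySem.List.enumerate l s).foldl (pvStepA n) (repo, true, sub) =
      (repo, true, sub ++ pvSeg n (PySem.List.enumerate l s)) := by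
  induction l with
  | nil => intro s hs repo sub; simp [PySem.List.enumerate_nil, pvSeg]
  | cons p t ih =>
      intro s hs repo sub
      rw [PySem.List.enumerate_cons]
      simp only [List.foldl_cons, pvStepA]
      rw [if_neg (by omega)]
      simp only [Bool.not_true, Bool.false_and, Bool.false_eq_true, if_false]
      rw [ih (s + 1) (by omega)]
      simp only [pvSeg, List.filterMap_cons]
      split <;> simp

lemma foldl_pre (n : Nat) (l : List String) : ∀ (s : Nat), 5 ≤ s → ∀ repo,
    (PySem.List.enumerate l (s : Int)).foldl (pvStepA n) (repo, false, []) =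
      (repo ++ l.take (pvFindBranch s l - s), decide (pvFindBranch s l - s < l.length),
        pvSeg n (PySem.List.enumerate (l.drop (pvFindBranch s l - s)) ((pvFindBranch s l : Int)))) := by
  induction l with
  | nil =>
      intro s hs repo
      simp [PySem.List.enumerate_nil, pvFindBranch, pvSeg]
  | cons p t ih =>
      intro s hs repo
      rw [PySem.List.enumerate_cons]
      simp only [List.foldl_cons, pvStepA]
      rw [if_neg (by omega), pvCond_eq]
      by_cases hbr : (PySem.Str.isIn "." p || p == "main" || p == "master") = true
      · -- branch found at index s
        rw [hbr]
        simp only [Bool.not_true, Bool.false_eq_true, if_false]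
        rw [foldl_post n t (s + 1) (by omega)]
        have hj : pvFindBranch s (p :: t) = s := by
          simp only [pvFindBranch]; rw [hbr]; simp
        rw [hj]
        simp only [Nat.sub_self, List.take_zero, List.drop_zero, List.append_nil,
          PySem.List.enumerate_cons, pvSeg, List.filterMap_cons, List.length_cons,
          Prod.mk.injEq]
        refine ⟨by trivial, by simp, ?_⟩
        split <;> simp
      · -- not a branch part: appended to repo
        rw [Bool.not_eq_true] at hbr
        rw [hbr]
        simp only [Bool.not_false, if_true]
        have hcast : ((s : Int) + 1) = ((s + 1 : Nat) : Int) := by push_cast; ring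
        rw [hcast, ih (s + 1) (by omega)]
        have hj : pvFindBranch s (p :: t) = pvFindBranch (s + 1) t := by
          simp only [pvFindBranch]; rw [hbr]; simp
        have hge := pvFindBranch_ge t (s + 1)
        rw [hj]
        have hd : pvFindBranch (s + 1) t - s = (pvFindBranch (s + 1) t - (s + 1)) + 1 := by omega
        rw [hd]
        simp only [List.take_succ_cons, List.drop_succ_cons, List.length_cons, Prod.mk.injEq]
        refine ⟨by simp, ?_, by trivial⟩
        simp only [decide_eq_decide]; omega

lemma pvSeg_eq_dropLast (l : List String) : ∀ (s : Nat),
    pvSeg (s + l.length) (PySem.List.enumerate l (s : Int)) = l.dropLast := by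
  induction l with
  | nil => intro s; simp [PySem.List.enumerate_nil, pvSeg]
  | cons p t ih =>
      intro s
      cases t with
      | nil =>
          simp only [PySem.List.enumerate_cons, PySem.List.enumerate_nil, pvSeg,
            List.filterMap_cons, List.filterMap_nil, List.length_cons, List.length_nil]
          rw [if_neg (by push_cast; omega)]
          rfl
      | cons q u =>
          rw [PySem.List.enumerate_cons]
          simp only [pvSeg, List.filterMap_cons, List.length_cons]
          rw [if_pos (by push_cast; omega)]
          have hn : s + (u.length + 1 + 1) = (s + 1) + (q :: u).length := by
            simp only [List.length_cons]; omega
          simp only [hn]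
          have hcast : ((s : Int) + 1) = ((s + 1 : Nat) : Int) := by push_cast; ring
          rw [hcast]
          have h := ih (s + 1)
          simp only [pvSeg] at h
          rw [h]
          simp [List.dropLast]

lemma foldl_low (n : Nat) (l : List String) : ∀ (s : Int), s + l.length ≤ 5 → ∀ repo bf sub,
    (PySem.List.enumerate l s).foldl (pvStepA n) (repo, bf, sub) = (repo ++ l, bf, sub) := by
  induction l with
  | nil => intro s hs repo bf sub; simp [PySem.List.enumerate_nil]
  | cons p t ih =>
      intro s hs repo bf sub
      rw [PySem.List.enumerate_cons]
      simp only [List.foldl_cons, pvStepA]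
      rw [if_pos (by simp at hs; omega)]
      rw [ih (s + 1) (by simp at hs ⊢; omega)]
      simp

-- A's body equals the slice form at j = pvFindBranch 5 (parts.drop 5)
lemma body_eq (parts : List String) :
    (PySem.Str.join "/" ((PySem.List.enumerate parts 0).foldl (pvStepA parts.length) ([], false, [])).1,
     PySem.Str.join "/"
       (if ((PySem.List.enumerate parts 0).foldl (pvStepA parts.length) ([], false, [])).2.2 ≠ [] then
          PySem.List.slice ((PySem.List.enumerate parts 0).foldl (pvStepA parts.length) ([], false, [])).2.2
            (some 1) none
        else [])) =
    (PySem.Str.join "/" (PySem.List.slice parts none (some ((pvFindBranch 5 (parts.drop 5) : Nat) : Int))),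
     PySem.Str.join "/"
       (PySem.List.slice parts (some (((pvFindBranch 5 (parts.drop 5) : Nat) : Int) + 1))
         (some ((parts.length : Int) - 1)))) := by
  have hsplit : PySem.List.enumerate parts 0 =
      PySem.List.enumerate (parts.take 5) 0 ++
        PySem.List.enumerate (parts.drop 5) (((parts.take 5).length : Nat) : Int) := by
    conv_lhs => rw [← List.take_append_drop 5 parts]
    rw [PySem.List.enumerate_append]
    norm_num
  rw [hsplit, List.foldl_append, foldl_low parts.length (parts.take 5) 0 (by simp) [] false []]
  by_cases h5 : parts.length ≤ 5
  · -- fewer than six parts: no branch scan happens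
    have hdrop : parts.drop 5 = [] := List.drop_eq_nil_of_le h5
    have htake : parts.take 5 = parts := List.take_of_length_le h5
    rw [hdrop, htake]
    simp only [PySem.List.enumerate_nil, List.foldl_nil, List.nil_append, pvFindBranch,
      ne_eq, not_true_eq_false, if_false]
    rw [Prod.mk.injEq]
    constructor
    · rw [PySem.List.slice_to parts (by omega : (0:Int) ≤ ((5:Nat):Int))]
      rw [Int.toNat_natCast, List.take_of_length_le h5]
    · have hb : PySem.List.slice parts (some (((5:Nat):Int) + 1)) (some ((parts.length : Int) - 1)) = [] := by
        cases parts with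
        | nil => simp [PySem.List.slice]
        | cons a rest =>
            have h1 : (((5:Nat):Int) + 1) = ((6:Nat):Int) := by norm_num
            have h2 : (((a :: rest).length : Int) - 1) = (((a :: rest).length - 1 : Nat) : Int) := by
              simp only [List.length_cons]; omega
            rw [h1, h2, PySem.List.slice_natCast]
            rw [List.drop_eq_nil_of_le (by simp at h5 ⊢; omega)]
            simp
      rw [hb]
  · -- at least six parts: the scan starts at index 5
    rw [not_le] at h5
    have hlen5 : (parts.take 5).length = 5 := by simp; omega
    rw [hlen5, foldl_pre parts.length (parts.drop 5) 5 (le_refl 5) ([] ++ parts.take 5)]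
    have hge : 5 ≤ pvFindBranch 5 (parts.drop 5) := pvFindBranch_ge _ 5
    have hle : pvFindBranch 5 (parts.drop 5) ≤ parts.length := by
      have := pvFindBranch_le (parts.drop 5) 5
      simp only [List.length_drop] at this
      omega
    set j := pvFindBranch 5 (parts.drop 5) with hj
    have hrepo : ([] ++ parts.take 5) ++ (parts.drop 5).take (j - 5) = parts.take j := by
      rw [List.nil_append, ← List.take_add (l := parts) (i := 5) (j := j - 5)]
      congr 1
      omega
    have hdd : (parts.drop 5).drop (j - 5) = parts.drop j := by
      rw [List.drop_drop]
      congr 1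
      omega
    have hnlen : parts.length = j + (parts.drop j).length := by
      simp only [List.length_drop]; omega
    have hsub : pvSeg parts.length (PySem.List.enumerate (parts.drop j) ((j : Nat) : Int)) =
        (parts.drop j).dropLast := by
      conv_lhs => rw [hnlen]
      exact pvSeg_eq_dropLast (parts.drop j) j
    simp only [hrepo, hdd, hsub]
    rw [Prod.mk.injEq]
    constructor
    · rw [PySem.List.slice_to parts (by positivity)]
      norm_num
    · -- subdirectory: drop the branch part itself and the trailing element
      have hfrom : ∀ (l : List String), (if l ≠ [] then PySem.List.slice l (some 1) none else []) = l.drop 1 := by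
        intro l
        by_cases hl : l = []
        · simp [hl]
        · rw [if_pos hl, PySem.List.slice_from l (by norm_num)]
          norm_num
      rw [hfrom]
      have h1 : ((j : Int) + 1) = ((j + 1 : Nat) : Int) := by push_cast; ring
      have h2 : ((parts.length : Int) - 1) = ((parts.length - 1 : Nat) : Int) := by
        push_cast [Nat.cast_sub (by omega : 1 ≤ parts.length)]; ring
      rw [h1, h2, PySem.List.slice_natCast]
      rw [List.dropLast_eq_take, List.length_drop]
      rw [List.drop_take]
      rw [List.drop_drop]
      have h3 : parts.length - j - 1 - 1 = parts.length - 1 - (j + 1) := by omega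
      rw [h3]

-- ---- B side: characterize B's right-to-left fold ----

-- pvStepB with the indexed element made explicit (foldr form over enumerate)
def pvStepB' (ip : Int × String) (st : List String × Option Int) : List String × Option Int :=
  if ip.1 < 5 || (!(PySem.Str.isIn "." ip.2) && !(ip.2 == "main" || ip.2 == "master")) then
    (st.1 ++ [ip.2], st.2)
  else
    ([], some ip.1)

lemma foldrB_low (l : List String) : ∀ (s : Int), s + l.length ≤ 5 → ∀ st,
    (PySem.List.enumerate l s).foldr pvStepB' st = (st.1 ++ l.reverse, st.2) := by
  induction l with
  | nil => intro s hs st; simp [PySem.List.enumerate_nil]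
  | cons p t ih =>
      intro s hs st
      rw [PySem.List.enumerate_cons]
      simp only [List.foldr_cons]
      rw [ih (s + 1) (by simp only [List.length_cons] at hs; push_cast at hs ⊢; omega)]
      simp only [pvStepB']
      have h5 : (s : Int) < 5 := by simp only [List.length_cons] at hs; push_cast at hs; omega
      rw [if_pos (by simp [h5])]
      simp

lemma foldrB_high (l : List String) : ∀ (s : Nat), 5 ≤ s → ∀ st,
    (PySem.List.enumerate l (s : Int)).foldr pvStepB' st =
      if pvFindBranch s l < s + l.length then
        ((l.take (pvFindBranch s l - s)).reverse, some ((pvFindBranch s l : Nat) : Int))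
      else (st.1 ++ l.reverse, st.2) := by
  induction l with
  | nil =>
      intro s hs st
      simp [PySem.List.enumerate_nil, pvFindBranch]
  | cons p t ih =>
      intro s hs st
      rw [PySem.List.enumerate_cons]
      simp only [List.foldr_cons]
      have hcast : ((s : Int) + 1) = ((s + 1 : Nat) : Int) := by push_cast; ring
      rw [hcast, ih (s + 1) (by omega)]
      by_cases hbr : (PySem.Str.isIn "." p || p == "main" || p == "master") = true
      · -- marker at index s: the step resets regardless of the inner result
        have hj : pvFindBranch s (p :: t) = s := by
          simp only [pvFindBranch]; rw [hbr]; simp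
        have h5' : ¬ ((s : Int) < 5) := by omega
        have hcond : (decide ((s : Int) < 5) || (!(PySem.Str.isIn "." p) && !(p == "main" || p == "master"))) = false := by
          rw [pvCondB_eq, hbr]
          simp [h5']
        split <;>
          · simp only [pvStepB', hcond, Bool.false_eq_true, if_false, hj]
            rw [if_pos (by simp only [List.length_cons]; omega)]
            simp
      · -- not a marker (index ≥ 5): kept
        rw [Bool.not_eq_true] at hbr
        have hj : pvFindBranch s (p :: t) = pvFindBranch (s + 1) t := by
          simp only [pvFindBranch]; rw [hbr]; simp
        have hge := pvFindBranch_ge t (s + 1)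
        have hcond : (decide ((s : Int) < 5) || (!(PySem.Str.isIn "." p) && !(p == "main" || p == "master"))) = true := by
          rw [pvCondB_eq, hbr]
          simp
        rw [hj]
        by_cases hfound : pvFindBranch (s + 1) t < (s + 1) + t.length
        · rw [if_pos hfound, if_pos (by simp only [List.length_cons]; omega)]
          simp only [pvStepB', hcond, if_true]
          have htake : (p :: t).take (pvFindBranch (s + 1) t - s) =
              p :: t.take (pvFindBranch (s + 1) t - (s + 1)) := by
            have hd : pvFindBranch (s + 1) t - s = (pvFindBranch (s + 1) t - (s + 1)) + 1 := by omega
            rw [hd, List.take_succ_cons]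
          rw [htake]
          simp
        · rw [if_neg hfound, if_neg (by simp only [List.length_cons]; omega)]
          simp only [pvStepB', hcond, if_true]
          simp

-- the full right-to-left fold over all of parts
lemma foldrB_core (parts : List String) :
    (PySem.List.enumerate parts 0).foldr pvStepB' (([] : List String), (none : Option Int)) =
      if pvFindBranch 5 (parts.drop 5) < parts.length then
        ((parts.take (pvFindBranch 5 (parts.drop 5))).reverse,
          some ((pvFindBranch 5 (parts.drop 5) : Nat) : Int))
      else (parts.reverse, none) := by
  have hsplit : PySem.List.enumerate parts 0 =
      PySem.List.enumerate (parts.take 5) 0 ++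
        PySem.List.enumerate (parts.drop 5) (((parts.take 5).length : Nat) : Int) := by
    conv_lhs => rw [← List.take_append_drop 5 parts]
    rw [PySem.List.enumerate_append]
    norm_num
  rw [hsplit, List.foldr_append]
  by_cases h5 : parts.length ≤ 5
  · have hdrop : parts.drop 5 = [] := List.drop_eq_nil_of_le h5
    have htake : parts.take 5 = parts := List.take_of_length_le h5
    rw [hdrop, htake]
    simp only [PySem.List.enumerate_nil, List.foldr_nil]
    rw [foldrB_low parts 0 (by omega) _]
    rw [if_neg (by simp only [pvFindBranch]; omega)]
    simp
  · rw [not_le] at h5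
    have hlen5 : (parts.take 5).length = 5 := by simp; omega
    rw [hlen5, foldrB_high (parts.drop 5) 5 (le_refl 5)]
    have hge : 5 ≤ pvFindBranch 5 (parts.drop 5) := pvFindBranch_ge _ 5
    have hlend : (parts.drop 5).length = parts.length - 5 := by simp
    set j := pvFindBranch 5 (parts.drop 5) with hj
    have hiff : (j < 5 + (parts.drop 5).length) ↔ (j < parts.length) := by rw [hlend]; omega
    by_cases hfound : j < parts.length
    · rw [if_pos (hiff.mpr hfound)]
      rw [foldrB_low (parts.take 5) 0 (by rw [hlen5]; norm_num)]
      rw [if_pos hfound]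
      have hrepo : parts.take 5 ++ (parts.drop 5).take (j - 5) = parts.take j := by
        rw [← List.take_add (l := parts) (i := 5) (j := j - 5)]
        congr 1
        omega
      rw [Prod.mk.injEq]
      constructor
      · rw [← hrepo, List.reverse_append]
      · rfl
    · rw [if_neg (fun h => hfound (hiff.mp h))]
      rw [foldrB_low (parts.take 5) 0 (by rw [hlen5]; norm_num)]
      rw [if_neg hfound]
      rw [Prod.mk.injEq]
      constructor
      · conv_rhs => rw [← List.take_append_drop 5 parts]
        rw [List.reverse_append]
        simp
      · rfl

-- B's body equals the same slice form
lemma bodyB_eq (parts : List String) :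
    (PySem.Str.join "/"
       ((PySem.List.pyRange ((parts.length : Int) - 1) (-1) (-1)).foldl (pvStepB parts) ([], none)).1.reverse,
     PySem.Str.join "/"
       (match ((PySem.List.pyRange ((parts.length : Int) - 1) (-1) (-1)).foldl (pvStepB parts) ([], none)).2 with
        | none => ([] : List String)
        | some c => PySem.List.slice parts (some (c + 1)) (some ((parts.length : Int) - 1)))) =
    (PySem.Str.join "/" (PySem.List.slice parts none (some ((pvFindBranch 5 (parts.drop 5) : Nat) : Int))),
     PySem.Str.join "/"
       (PySem.List.slice parts (some (((pvFindBranch 5 (parts.drop 5) : Nat) : Int) + 1))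
         (some ((parts.length : Int) - 1)))) := by
  have hrange : PySem.List.pyRange ((parts.length : Int) - 1) (-1) (-1) =
      (PySem.List.pyRange 0 (parts.length : Int) 1).reverse := by
    rw [PySem.List.pyRange_neg_one_eq_reverse]
    norm_num
  have hfold : (PySem.List.pyRange ((parts.length : Int) - 1) (-1) (-1)).foldl (pvStepB parts) ([], none) =
      (PySem.List.enumerate parts 0).foldr pvStepB' (([] : List String), (none : Option Int)) := by
    rw [hrange, List.foldl_reverse]
    rw [PySem.List.enumerate_eq_map_pyRange parts "", List.foldr_map]
    simp only [PySem.List.len_eq]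
    rfl
  rw [hfold, foldrB_core]
  have hge : 5 ≤ pvFindBranch 5 (parts.drop 5) := pvFindBranch_ge _ 5
  have hle : pvFindBranch 5 (parts.drop 5) ≤ 5 + (parts.drop 5).length := pvFindBranch_le _ 5
  set j := pvFindBranch 5 (parts.drop 5) with hj
  by_cases hfound : j < parts.length
  · rw [if_pos hfound]
    rw [Prod.mk.injEq]
    constructor
    · rw [List.reverse_reverse, PySem.List.slice_to_natCast]
    · rfl
  · rw [if_neg hfound]
    rw [Prod.mk.injEq]
    constructor
    · rw [List.reverse_reverse, PySem.List.slice_to_natCast, List.take_of_length_le (by omega)]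
    · have hb : PySem.List.slice parts (some ((j : Int) + 1)) (some ((parts.length : Int) - 1)) = [] := by
        have h1 : ((j : Int) + 1) = ((j + 1 : Nat) : Int) := by push_cast; ring
        by_cases hn : parts.length = 0
        · rw [List.length_eq_zero_iff.mp hn]; simp [PySem.List.slice]
        · have h2 : ((parts.length : Int) - 1) = ((parts.length - 1 : Nat) : Int) := by
            push_cast [Nat.cast_sub (by omega : 1 ≤ parts.length)]; ring
          rw [h1, h2, PySem.List.slice_natCast]
          rw [List.drop_eq_nil_of_le (by omega)]
          simp
      rw [hb]

-- ===== VERDICT (by name: the statement is the Claim_ definition above) =====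
theorem parse_github_url_spec : Claim_equal_parse_github_url := by
  intro github_url _
  unfold Spec_parse_github_url parse_github_url parse_github_url_alt
  exact (body_eq _).trans (bodyB_eq _).symm
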